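-- pv_equiv track=rewrite | github.com/BLSQ/iaso | plugins/wfp/management/commands/wfp_etl_Under5.py | group_followup_steps
-- ===== SOURCE A (Python) =====
-- def group_followup_steps(steps, admission):
--     steps.pop(0)
--     followUpVisits = []
--     for sub_steps in steps:
--         for step in sub_steps:
--             followUpVisits.append(step)
--     followUp_steps = []
--     for i in range(0, len(followUpVisits), 3):
--         followUp_steps.append(followUpVisits[i : i + 3])
--     followUp_steps.insert(0, admission)
--     return followUp_steps
-- ===== SOURCE B (Python) =====
-- def group_followup_steps(steps, admission):
--     steps.pop(0)  # same caller-visible mutation as A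
--     result = [admission]
--     current = []
--     for sub_steps in steps:
--         for step in sub_steps:
--             current.append(step)
--             if len(current) == 3:
--                 result.append(current)
--                 current = []
--     if current:
--         result.append(current)
--     return result
-- ===== Notes on version B (the rewrite author's own statement) =====
-- stated objective: alternative
-- what changed: Replaces A's two-pass flatten-then-chunk (building an intermediate flat list, then slicing it by a range loop) with a single fused traversal that maintains a 3-element buffer, emitting each full group as it is seen and flushing the final partial group; no intermediate flat list or index arithmetic.
import Mathlib
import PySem

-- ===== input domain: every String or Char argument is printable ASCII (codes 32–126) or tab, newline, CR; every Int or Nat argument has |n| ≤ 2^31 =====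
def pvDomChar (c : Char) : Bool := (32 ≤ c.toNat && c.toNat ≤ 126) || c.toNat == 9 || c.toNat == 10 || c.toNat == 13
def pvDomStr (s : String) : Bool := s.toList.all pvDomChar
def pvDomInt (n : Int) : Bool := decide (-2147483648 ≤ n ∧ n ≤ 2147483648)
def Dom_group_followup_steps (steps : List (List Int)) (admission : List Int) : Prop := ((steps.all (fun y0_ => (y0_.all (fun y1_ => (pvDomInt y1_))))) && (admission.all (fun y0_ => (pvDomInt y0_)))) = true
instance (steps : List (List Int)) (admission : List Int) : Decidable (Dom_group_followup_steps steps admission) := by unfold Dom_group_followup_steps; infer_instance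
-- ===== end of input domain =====

-- B fuses A's flatten-then-chunk two-pass into one traversal with a 3-element buffer (objective: alternative,
-- same cost). Both versions mutate `steps` with pop(0); the equivalence proved is about the return value.

-- ===== PORT A =====
def group_followup_steps (steps : List (List Int)) (admission : List Int) : List (List Int) :=
  -- steps.pop(0): raises IndexError on [], excluded by Pre_; otherwise the remaining list is the tail
  let rest := steps.drop 1
  let followUpVisits :=
    rest.foldl (fun acc sub_steps => sub_steps.foldl (fun acc2 step => acc2 ++ [step]) acc) []
  let followUp_steps :=
    (PySem.List.pyRange 0 (followUpVisits.length : Int) 3).foldl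
      (fun acc i => acc ++ [PySem.List.slice followUpVisits (some i) (some (i + 3))]) []
  admission :: followUp_steps

-- ===== PORT B =====
-- the loop body of Source B: append step to current, push when it reaches length 3
def bStep (st : List (List Int) × List Int) (step : Int) : List (List Int) × List Int :=
  let current := st.2 ++ [step]
  if current.length == 3 then (st.1 ++ [current], []) else (st.1, current)

def group_followup_steps_alt (steps : List (List Int)) (admission : List Int) : List (List Int) :=
  -- steps.pop(0): raises IndexError on [], excluded by Pre_
  let rest := steps.drop 1
  let st := rest.foldl (fun st sub_steps => sub_steps.foldl bStep st) ([admission], [])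
  if st.2 == [] then st.1 else st.1 ++ [st.2]

-- ===== PRECONDITION & SPEC =====
-- steps.pop(0) raises IndexError on an empty steps list (in A and in B alike)
def Pre_group_followup_steps (steps : List (List Int)) (admission : List Int) : Prop := steps ≠ []
instance (steps : List (List Int)) (admission : List Int) : Decidable (Pre_group_followup_steps steps admission) := by unfold Pre_group_followup_steps; infer_instance
def pvWitness_group_followup_steps : List (List Int) × List Int := ([[0], [1, 2, 3], [4]], [9])

def Spec_group_followup_steps (steps : List (List Int)) (admission : List Int) (out : List (List Int)) : Prop := out = group_followup_steps_alt steps admission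
instance (steps : List (List Int)) (admission : List Int) (out : List (List Int)) : Decidable (Spec_group_followup_steps steps admission out) := by unfold Spec_group_followup_steps; infer_instance

-- ===== CLAIM (what is proved, stated in full; the proofs are below) =====
def Claim_equal_group_followup_steps : Prop := ∀ (steps : List (List Int)) (admission : List Int), Dom_group_followup_steps steps admission → Pre_group_followup_steps steps admission → Spec_group_followup_steps steps admission (group_followup_steps steps admission)

-- ===== LEMMAS AND PROOFS =====

-- reference chunking: split a list into consecutive groups of three
def chunks3 : List Int → List (List Int)
  | [] => []
  | [a] => [[a]]
  | [a, b] => [[a, b]]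
  | a :: b :: c :: t => [a, b, c] :: chunks3 t

-- A's range/slice chunk loop, in Nat form
lemma chunksA_nat (v : List Int) :
    (List.range ((v.length + 2) / 3)).map (fun k => (v.drop (3 * k)).take 3) = chunks3 v := by
  induction v using chunks3.induct with
  | case1 => simp [chunks3]
  | case2 a => simp [chunks3, List.range_succ]
  | case3 a b => simp [chunks3, List.range_succ]
  | case4 a b c t ih =>
    have hcount : ((a :: b :: c :: t).length + 2) / 3 = (t.length + 2) / 3 + 1 := by
      simp; omega
    rw [hcount, List.range_succ_eq_map, List.map_cons, List.map_map, chunks3]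
    have hmap : ∀ k ∈ List.range ((t.length + 2) / 3),
        ((fun k => List.take 3 (List.drop (3 * k) (a :: b :: c :: t))) ∘ (· + 1)) k
          = (fun k => List.take 3 (List.drop (3 * k) t)) k := by
      intro k _
      have hd : (a :: b :: c :: t).drop (3 * (k + 1)) = t.drop (3 * k) := by
        rw [show 3 * (k + 1) = 3 + 3 * k from by ring, ← List.drop_drop]
        rfl
      simp only [Function.comp]
      rw [hd]
    rw [List.map_congr_left hmap, ih]
    simp

-- A's chunk loop equals chunks3
lemma chunksA (v : List Int) :
    (PySem.List.pyRange 0 (v.length : Int) 3).foldl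
      (fun acc i => acc ++ [PySem.List.slice v (some i) (some (i + 3))]) [] = chunks3 v := by
  rw [PySem.List.foldl_append_singleton_eq_map, List.nil_append]
  rw [PySem.List.pyRange_of_pos 0 (v.length : Int) (by norm_num)]
  rw [List.map_map]
  have hcount : (if (0:Int) < (v.length : Int) then (((v.length : Int) - 0 + 3 - 1) / 3).toNat else 0)
      = (v.length + 2) / 3 := by
    split_ifs with h
    · omega
    · omega
  rw [hcount, ← chunksA_nat v]
  apply List.map_congr_left
  intro k _
  simp only [Function.comp]
  have h1 : (0 : Int) + 3 * (k : Int) = ((3 * k : Nat) : Int) := by push_cast; ring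
  rw [h1]
  have := PySem.List.slice_natCast_add v (3 * k) 3
  push_cast at this
  simpa using this

-- the fused loop of B, with the flush, continues chunking cur ++ v
lemma chunksB (v : List Int) : ∀ (cur : List Int) (res0 : List (List Int)), cur.length < 3 →
    (let st := v.foldl bStep (res0, cur);
     if st.2 == [] then st.1 else st.1 ++ [st.2]) = res0 ++ chunks3 (cur ++ v) := by
  induction v with
  | nil =>
    intro cur res0 h
    match cur with
    | [] => simp [chunks3]
    | [a] => simp [chunks3]
    | [a, b] => simp [chunks3]
    | a :: b :: c :: t => simp at h; omega
  | cons x v' ih =>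
    intro cur res0 h
    match cur with
    | [] =>
      simpa [bStep, chunks3] using ih [x] res0 (by simp)
    | [a] =>
      simpa [bStep, chunks3] using ih [a, x] res0 (by simp)
    | [a, b] =>
      have := ih [] (res0 ++ [[a, b, x]]) (by simp)
      simp only [List.foldl_cons, bStep] at *
      simpa [chunks3] using this
    | a :: b :: c :: t => simp at h; omega

-- ===== VERDICT (by name: the statement is the Claim_ definition above) =====
theorem group_followup_steps_spec : Claim_equal_group_followup_steps := by
  intro steps admission _ _
  unfold Spec_group_followup_steps group_followup_steps group_followup_steps_alt
  simp only [chunksA, List.foldl_flatten.symm]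
  rw [PySem.List.foldl_append_singleton, List.nil_append]
  simpa using (chunksB ((steps.drop 1).flatten) [] [admission] (by simp)).symm
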